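-- pv_equiv track=rewrite | github.com/desaiparam/LeetCode | 3531-count-covered-buildings/3531-count-covered-buildings.py | countCoveredBuildings
-- ===== SOURCE A (Python) =====
-- from typing import List
--
-- def countCoveredBuildings(n: int, buildings: List[List[int]]) -> int:
--     xmap = {}
--     ymap = {}
--     for x,y in buildings:
--         if x not in xmap:
--             xmap[x] = []
--         xmap[x].append(y)
--         if y not in ymap:
--             ymap[y] = []
--         ymap[y].append(x)
--     ans = 0
--     rowmax = {}
--     rowmin = {}
--     colmin = {}
--     colmax = {}
--     for x in xmap:
--         rowmin[x] = min(xmap[x])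
--         rowmax[x] = max(xmap[x])
--     for y in ymap:
--         colmin[y] = min(ymap[y])
--         colmax[y] = max(ymap[y])
--     for x,y in buildings:
--         if rowmin[x] < y < rowmax[x] and colmin[y] < x <colmax[y]:
--             ans += 1
--     return ans
-- ===== SOURCE B (Python) =====
-- from typing import List
--
-- def countCoveredBuildings(n: int, buildings: List[List[int]]) -> int:
--     ans = 0
--     for x, y in buildings:
--         if (any(bx == x and by < y for bx, by in buildings)
--                 and any(bx == x and by > y for bx, by in buildings)
--                 and any(by == y and bx < x for bx, by in buildings)
--                 and any(by == y and bx > x for bx, by in buildings)):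
--             ans += 1
--     return ans
-- ===== Notes on version B (the rewrite author's own statement) =====
-- stated objective: alternative
-- what changed: Instead of building per-row/per-column coordinate maps and reducing them to min/max tables, B tests each building directly by four existential scans over the whole list (is there a building in the same row below/above, and in the same column left/right), eliminating all dictionaries and the min/max reduction phase; correct because y lies strictly between the row's min and max iff some row-mate is smaller and some is larger (and symmetrically for columns).
import Mathlib
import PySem

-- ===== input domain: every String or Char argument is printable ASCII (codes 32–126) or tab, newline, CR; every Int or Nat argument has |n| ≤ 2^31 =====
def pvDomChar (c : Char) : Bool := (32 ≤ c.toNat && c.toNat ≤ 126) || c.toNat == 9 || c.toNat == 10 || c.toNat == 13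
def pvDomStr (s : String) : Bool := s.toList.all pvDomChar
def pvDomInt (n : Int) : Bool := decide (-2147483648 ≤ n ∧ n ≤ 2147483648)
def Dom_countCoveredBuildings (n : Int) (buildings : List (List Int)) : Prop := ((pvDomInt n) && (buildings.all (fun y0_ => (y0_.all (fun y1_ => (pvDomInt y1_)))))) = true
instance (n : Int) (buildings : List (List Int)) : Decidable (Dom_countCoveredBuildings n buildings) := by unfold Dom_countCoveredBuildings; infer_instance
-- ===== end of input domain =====

-- B replaces A's map-building + min/max-table phases by a direct per-building test
-- with four existential scans over the list; objective: alternative (no dicts, O(m^2) vs O(m)).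

-- shared unpacking of a row 'for x, y in buildings' (Pre_ guarantees length 2; other branches unreachable)
def pvXY (b : List Int) : Int × Int :=
  match b with
  | x :: y :: _ => (x, y)
  | _ => (0, 0)

-- ===== PORT A =====
def countCoveredBuildings (n : Int) (buildings : List (List Int)) : Int :=
  let maps := buildings.foldl
    (fun (s : PySem.Dict Int (List Int) × PySem.Dict Int (List Int)) b =>
      (let xm := if s.1.contains (pvXY b).1 then s.1 else s.1.insert (pvXY b).1 [];
       xm.modify (pvXY b).1 [] (fun l => l ++ [(pvXY b).2]),
       let ym := if s.2.contains (pvXY b).2 then s.2 else s.2.insert (pvXY b).2 [];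
       ym.modify (pvXY b).2 [] (fun l => l ++ [(pvXY b).1])))
    (PySem.Dict.empty, PySem.Dict.empty)
  let xmap := maps.1
  let ymap := maps.2
  -- 'for x in xmap: rowmin[x] = min(xmap[x]); rowmax[x] = max(xmap[x])'
  -- (min/max .getD 0 unreachable: xmap values are nonempty; dict lookups by .getD 0: key always present)
  let rows := xmap.keys.foldl
    (fun (s : PySem.Dict Int Int × PySem.Dict Int Int) x =>
      (s.1.insert x ((PySem.List.min? (xmap.getD x []) (fun v => v)).getD 0),
       s.2.insert x ((PySem.List.max? (xmap.getD x []) (fun v => v)).getD 0)))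
    (PySem.Dict.empty, PySem.Dict.empty)
  let cols := ymap.keys.foldl
    (fun (s : PySem.Dict Int Int × PySem.Dict Int Int) y =>
      (s.1.insert y ((PySem.List.min? (ymap.getD y []) (fun v => v)).getD 0),
       s.2.insert y ((PySem.List.max? (ymap.getD y []) (fun v => v)).getD 0)))
    (PySem.Dict.empty, PySem.Dict.empty)
  buildings.foldl
    (fun ans b =>
      if rows.1.getD (pvXY b).1 0 < (pvXY b).2 ∧ (pvXY b).2 < rows.2.getD (pvXY b).1 0 ∧
         cols.1.getD (pvXY b).2 0 < (pvXY b).1 ∧ (pvXY b).1 < cols.2.getD (pvXY b).2 0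
      then ans + 1 else ans) 0

-- ===== PORT B =====
-- 'ans += 1 if any(... by < y ...) and any(... by > y ...) and any(... bx < x ...) and any(... bx > x ...)'
def countCoveredBuildings_alt (n : Int) (buildings : List (List Int)) : Int :=
  buildings.foldl
    (fun ans b =>
      if (buildings.any (fun c => (pvXY c).1 == (pvXY b).1 && decide ((pvXY c).2 < (pvXY b).2))) &&
         (buildings.any (fun c => (pvXY c).1 == (pvXY b).1 && decide ((pvXY c).2 > (pvXY b).2))) &&
         (buildings.any (fun c => (pvXY c).2 == (pvXY b).2 && decide ((pvXY c).1 < (pvXY b).1))) &&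
         (buildings.any (fun c => (pvXY c).2 == (pvXY b).2 && decide ((pvXY c).1 > (pvXY b).1)))
      then ans + 1 else ans) 0

-- ===== PRECONDITION & SPEC =====
-- Pre_ excludes exactly the inputs where Python A raises: a row that is not a 2-element list
-- makes 'for x, y in buildings' raise ValueError.
def Pre_countCoveredBuildings (n : Int) (buildings : List (List Int)) : Prop :=
  ∀ b ∈ buildings, b.length = 2
instance (n : Int) (buildings : List (List Int)) : Decidable (Pre_countCoveredBuildings n buildings) := by
  unfold Pre_countCoveredBuildings; infer_instance

def pvWitness_countCoveredBuildings : Int × List (List Int) :=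
  (9, [[1, 2], [1, 5], [1, 3], [0, 3], [2, 3]])

def Spec_countCoveredBuildings (n : Int) (buildings : List (List Int)) (out : Int) : Prop := out = countCoveredBuildings_alt n buildings
instance (n : Int) (buildings : List (List Int)) (out : Int) : Decidable (Spec_countCoveredBuildings n buildings out) := by unfold Spec_countCoveredBuildings; infer_instance

-- ===== CLAIM (what is proved, stated in full; the proofs are below) =====
def Claim_equal_countCoveredBuildings : Prop := ∀ (n : Int) (buildings : List (List Int)), Dom_countCoveredBuildings n buildings → Pre_countCoveredBuildings n buildings → Spec_countCoveredBuildings n buildings (countCoveredBuildings n buildings)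

-- ===== LEMMAS AND PROOFS =====

-- A's 'if x not in d: d[x] = []; d[x].append(y)' is a single modify
theorem pvStepA_eq (d : PySem.Dict Int (List Int)) (x y : Int) :
    ((if d.contains x then d else d.insert x []).modify x [] (fun l => l ++ [y]))
      = d.modify x [] (fun l => l ++ [y]) := by
  by_cases h : d.contains x
  · simp [h]
  · have hn : d.get? x = none := by
      rw [PySem.Dict.get?_eq_none_iff_contains]; simpa using h
    simp [h, PySem.Dict.modify, PySem.Dict.insert_insert_self,
      PySem.Dict.getD_eq_get?_getD, hn]

-- lookup in a dict built by inserting f k at each key of ks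
theorem pvGetD_foldl_insert_fun (ks : List Int) (f : Int → Int) (d : PySem.Dict Int Int) (c : Int) :
    (ks.foldl (fun d x => d.insert x (f x)) d).getD c 0
      = if c ∈ ks then f c else d.getD c 0 := by
  induction ks generalizing d with
  | nil => simp
  | cons k t ih =>
    simp only [List.foldl_cons, ih, PySem.Dict.getD_insert, List.mem_cons]
    by_cases hc : c ∈ t
    · simp [hc]
    · by_cases he : c = k <;> simp [hc, he]

-- A's grouping step over the pair list
def pvMstep (d : PySem.Dict Int (List Int)) (p : Int × Int) : PySem.Dict Int (List Int) :=
  d.modify p.1 [] (fun l => l ++ [p.2])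

def pvGrp (ps : List (Int × Int)) : PySem.Dict Int (List Int) :=
  ps.foldl pvMstep PySem.Dict.empty

theorem pvA_maps_gen (bs : List (List Int)) (d1 d2 : PySem.Dict Int (List Int)) :
    bs.foldl
      (fun (s : PySem.Dict Int (List Int) × PySem.Dict Int (List Int)) b =>
        (let xm := if s.1.contains (pvXY b).1 then s.1 else s.1.insert (pvXY b).1 [];
         xm.modify (pvXY b).1 [] (fun l => l ++ [(pvXY b).2]),
         let ym := if s.2.contains (pvXY b).2 then s.2 else s.2.insert (pvXY b).2 [];
         ym.modify (pvXY b).2 [] (fun l => l ++ [(pvXY b).1]))) (d1, d2)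
    = ((bs.map pvXY).foldl pvMstep d1, ((bs.map pvXY).map Prod.swap).foldl pvMstep d2) := by
  induction bs generalizing d1 d2 with
  | nil => rfl
  | cons b t ih =>
    simp only [List.foldl_cons, List.map_cons]
    rw [pvStepA_eq, pvStepA_eq, ih]
    rfl

theorem pvGrp_getD (ps : List (Int × Int)) (c : Int) :
    (pvGrp ps).getD c [] = (ps.filter (fun p => p.1 == c)).map (fun p => p.2) := by
  unfold pvGrp pvMstep
  rw [PySem.Dict.getD_foldl_modify_append]
  simp

theorem pvGrp_mem_keys (ps : List (Int × Int)) (c : Int) :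
    c ∈ (pvGrp ps).keys ↔ c ∈ ps.map (fun p => p.1) := by
  unfold pvGrp pvMstep
  rw [PySem.Dict.keys_foldl_modify_key]
  simp

theorem pvGrp_ne (ps : List (Int × Int)) (p : Int × Int) (hp : p ∈ ps) :
    ∃ hd tl, ((ps.filter (fun q => q.1 == p.1)).map (fun q => q.2)) = hd :: tl := by
  have hm : p ∈ ps.filter (fun q => q.1 == p.1) := List.mem_filter.2 ⟨hp, by simp⟩
  cases h : (ps.filter (fun q => q.1 == p.1)).map (fun q => q.2) with
  | nil =>
    exfalso
    have : p.2 ∈ (ps.filter (fun q => q.1 == p.1)).map (fun q => q.2) :=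
      List.mem_map_of_mem hm
    simp [h] at this
  | cons hd tl => exact ⟨hd, tl, rfl⟩

-- running min/max of a nonempty list compared against a bound is an existential
theorem pvFoldl_min_lt (t : List Int) (a y : Int) :
    (t.foldl min a < y) ↔ (a < y ∨ ∃ z ∈ t, z < y) := by
  induction t generalizing a with
  | nil => simp
  | cons h t ih =>
    simp only [List.foldl_cons, ih, min_lt_iff, List.mem_cons]
    constructor
    · rintro (⟨h1 | h1⟩ | ⟨z, hz, hlt⟩)
      · exact Or.inl h1
      · exact Or.inr ⟨h, Or.inl rfl, h1⟩
      · exact Or.inr ⟨z, Or.inr hz, hlt⟩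
    · rintro (h1 | ⟨z, (rfl | hz), hlt⟩)
      · exact Or.inl (Or.inl h1)
      · exact Or.inl (Or.inr hlt)
      · exact Or.inr ⟨z, hz, hlt⟩

theorem pvLt_foldl_max (t : List Int) (a y : Int) :
    (y < t.foldl max a) ↔ (y < a ∨ ∃ z ∈ t, y < z) := by
  induction t generalizing a with
  | nil => simp
  | cons h t ih =>
    simp only [List.foldl_cons, ih, lt_max_iff, List.mem_cons]
    constructor
    · rintro (⟨h1 | h1⟩ | ⟨z, hz, hlt⟩)
      · exact Or.inl h1
      · exact Or.inr ⟨h, Or.inl rfl, h1⟩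
      · exact Or.inr ⟨z, Or.inr hz, hlt⟩
    · rintro (h1 | ⟨z, (rfl | hz), hlt⟩)
      · exact Or.inl (Or.inl h1)
      · exact Or.inl (Or.inr hlt)
      · exact Or.inr ⟨z, hz, hlt⟩

-- 'min of the group < y' iff some group element is < y (group nonempty)
theorem pvMinGetD_lt (l : List Int) (y : Int) (h : ∃ hd tl, l = hd :: tl) :
    ((PySem.List.min? l (fun v => v)).getD 0 < y) ↔ ∃ z ∈ l, z < y := by
  obtain ⟨hd, tl, rfl⟩ := h
  rw [PySem.List.min?_id_cons]
  simp only [Option.getD_some, pvFoldl_min_lt, List.mem_cons]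
  constructor
  · rintro (h1 | ⟨z, hz, hlt⟩)
    · exact ⟨hd, Or.inl rfl, h1⟩
    · exact ⟨z, Or.inr hz, hlt⟩
  · rintro ⟨z, (rfl | hz), hlt⟩
    · exact Or.inl hlt
    · exact Or.inr ⟨z, hz, hlt⟩

theorem pvLt_maxGetD (l : List Int) (y : Int) (h : ∃ hd tl, l = hd :: tl) :
    (y < (PySem.List.max? l (fun v => v)).getD 0) ↔ ∃ z ∈ l, y < z := by
  obtain ⟨hd, tl, rfl⟩ := h
  rw [PySem.List.max?_id_cons]
  simp only [Option.getD_some, pvLt_foldl_max, List.mem_cons]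
  constructor
  · rintro (h1 | ⟨z, hz, hlt⟩)
    · exact ⟨hd, Or.inl rfl, h1⟩
    · exact ⟨z, Or.inr hz, hlt⟩
  · rintro ⟨z, (rfl | hz), hlt⟩
    · exact Or.inl hlt
    · exact Or.inr ⟨z, hz, hlt⟩

-- ===== VERDICT (by name: the statement is the Claim_ definition above) =====
theorem countCoveredBuildings_spec : Claim_equal_countCoveredBuildings := by
  intro n bs _ _
  unfold Spec_countCoveredBuildings countCoveredBuildings countCoveredBuildings_alt
  simp only []
  rw [pvA_maps_gen]
  simp only [show ∀ ps : List (Int × Int),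
      ps.foldl pvMstep PySem.Dict.empty = pvGrp ps from fun _ => rfl]
  rw [PySem.List.foldl_prod_mk
        (f := fun (d : PySem.Dict Int Int) x =>
          d.insert x ((PySem.List.min? ((pvGrp (bs.map pvXY)).getD x []) (fun v => v)).getD 0))
        (g := fun (d : PySem.Dict Int Int) x =>
          d.insert x ((PySem.List.max? ((pvGrp (bs.map pvXY)).getD x []) (fun v => v)).getD 0)),
      PySem.List.foldl_prod_mk
        (f := fun (d : PySem.Dict Int Int) y =>
          d.insert y ((PySem.List.min? ((pvGrp ((bs.map pvXY).map Prod.swap)).getD y []) (fun v => v)).getD 0))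
        (g := fun (d : PySem.Dict Int Int) y =>
          d.insert y ((PySem.List.max? ((pvGrp ((bs.map pvXY).map Prod.swap)).getD y []) (fun v => v)).getD 0))]
  apply PySem.List.foldl_congr_mem
  intro acc b hb
  have hp : pvXY b ∈ bs.map pvXY := List.mem_map_of_mem hb
  have hps : Prod.swap (pvXY b) ∈ (bs.map pvXY).map Prod.swap := List.mem_map_of_mem hp
  have hx : (pvXY b).1 ∈ (bs.map pvXY).map (fun p => p.1) := List.mem_map_of_mem hp
  have hy : (pvXY b).2 ∈ ((bs.map pvXY).map Prod.swap).map (fun p => p.1) := by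
    simpa using List.mem_map_of_mem (f := fun p => p.1) hps
  have hneX := pvGrp_ne (bs.map pvXY) (pvXY b) hp
  have hneY := pvGrp_ne ((bs.map pvXY).map Prod.swap) (Prod.swap (pvXY b)) hps
  rw [pvGetD_foldl_insert_fun, pvGetD_foldl_insert_fun, pvGetD_foldl_insert_fun,
      pvGetD_foldl_insert_fun,
      if_pos ((pvGrp_mem_keys _ _).2 hx), if_pos ((pvGrp_mem_keys _ _).2 hx),
      if_pos ((pvGrp_mem_keys _ _).2 hy), if_pos ((pvGrp_mem_keys _ _).2 hy),
      pvGrp_getD, pvGrp_getD]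
  have hneY' : ∃ hd tl, ((((bs.map pvXY).map Prod.swap).filter (fun q => q.1 == (pvXY b).2)).map (fun q => q.2)) = hd :: tl := hneY
  simp only [pvMinGetD_lt _ ((pvXY b).2) hneX, pvLt_maxGetD _ ((pvXY b).2) hneX,
    pvMinGetD_lt _ ((pvXY b).1) hneY', pvLt_maxGetD _ ((pvXY b).1) hneY']
  refine if_congr ?_ rfl rfl
  simp only [List.mem_map, List.mem_filter, beq_iff_eq, Bool.and_eq_true, List.any_eq_true,
    decide_eq_true_eq, gt_iff_lt]
  aesop
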